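-- pv_equiv track=rewrite | github.com/wonjun6715/coding_test | 프로그래머스/unrated/181921. 배열 만들기 2/배열 만들기 2.py | solution
-- ===== SOURCE A (Python) =====
-- def solution(l, r):
--
--     answer = []
--     for i in range(l, r+1):
--         ch = str(i)
--         if i % 5 != 0:
--             continue
--         for i in range(len(ch)):
--             if '5' not in ch[i] and '0' not in ch[i]:
--                 break
--         else:
--             answer.append(int(ch))
--     if answer:
--         return answer
--     else:
--         return [-1]
-- ===== SOURCE B (Python) =====
-- def solution(l, r):
--     # Generate only the candidates (numbers whose digits are all 0/5) instead of
--     # scanning the whole range: 0, then digit-by-digit from the seed 5.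
--     answer = [0] if l <= 0 <= r else []
--     level = [5]
--     for _ in range(10):  # levels cover 1..10 digit candidates, enough for |r| <= 2**31
--         answer += [x for x in level if l <= x <= r]
--         level = [10 * x + d for x in level for d in (0, 5)]
--     return answer if answer else [-1]
-- ===== Notes on version B (the rewrite author's own statement) =====
-- stated objective: faster
-- what changed: Instead of scanning every integer in [l, r] and string-checking its digits, B generates only the candidates whose digits are all 0/5 (seed 5, extended digit-by-digit level by level, plus 0), filters them into [l, r], already in ascending order.
import Mathlib
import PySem

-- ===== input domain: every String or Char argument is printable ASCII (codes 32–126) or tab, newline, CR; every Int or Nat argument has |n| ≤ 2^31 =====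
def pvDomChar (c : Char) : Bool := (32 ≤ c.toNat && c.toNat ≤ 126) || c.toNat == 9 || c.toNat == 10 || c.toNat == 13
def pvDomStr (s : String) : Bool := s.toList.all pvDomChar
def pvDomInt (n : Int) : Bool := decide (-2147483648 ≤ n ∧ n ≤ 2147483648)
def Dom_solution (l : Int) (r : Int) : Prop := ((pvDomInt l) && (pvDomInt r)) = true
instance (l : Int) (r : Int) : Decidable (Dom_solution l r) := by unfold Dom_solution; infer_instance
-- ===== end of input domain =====

-- B enumerates only the {0,5}-digit candidates instead of scanning the whole range (objective: faster).

-- ===== PORT A =====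
/-- A's inner `for i in range(len(ch))` with break/else, scanning ch in order:
    `true` ↔ the loop finishes without break (every position is '5' or '0'). -/
def pvCheck : List Char → Bool
  | [] => true
  | c :: cs => if ¬(c = '5' ∨ c = '0') then false else pvCheck cs

/-- Hand port of `int(ch)` (base-10 digit accumulation); exact at its only call site,
    where the digit check on ch = str(i) has just passed, so ch is a pure digit string. -/
def pvInt (cs : List Char) : Int := cs.foldl (fun a c => 10 * a + ((c.toNat : Int) - 48)) 0

def solution (l : Int) (r : Int) : List Int :=
  let answer := (PySem.List.pyRange l (r + 1) 1).foldl
    (fun answer i =>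
      let ch := PySem.Int.toChars i
      if PySem.Int.mod i 5 ≠ 0 then answer
      else if pvCheck ch then answer ++ [pvInt ch] else answer) []
  if answer = [] then [-1] else answer

-- ===== PORT B =====
def solution_alt (l : Int) (r : Int) : List Int :=
  let answer : List Int := if l ≤ 0 ∧ 0 ≤ r then [0] else []
  let p := (List.range 10).foldl
    (fun (p : List Int × List Int) _ =>
      (p.1 ++ p.2.filter (fun x => decide (l ≤ x ∧ x ≤ r)),
       p.2.flatMap (fun x => [10 * x + 0, 10 * x + 5])))
    (answer, [5])
  if p.1 = [] then [-1] else p.1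

-- ===== PRECONDITION & SPEC =====
def Spec_solution (l : Int) (r : Int) (out : List Int) : Prop := out = solution_alt l r
instance (l : Int) (r : Int) (out : List Int) : Decidable (Spec_solution l r out) := by unfold Spec_solution; infer_instance

-- ===== CLAIM (what is proved, stated in full; the proofs are below) =====
def Claim_equal_solution : Prop := ∀ (l : Int) (r : Int), Dom_solution l r → Spec_solution l r (solution l r)

-- ===== LEMMAS AND PROOFS =====

/-- Arithmetic counterpart of A's digit-string check, for n ≥ 0. -/
def pvGoodN (n : Nat) : Bool :=
  if h : n < 10 then (n == 0 || n == 5)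
  else ((n % 10 == 0 || n % 10 == 5) && pvGoodN (n / 10))
termination_by n
decreasing_by omega

/-- B's k-th level list. -/
def pvGen : Nat → List Int
  | 0 => [5]
  | k + 1 => (pvGen k).flatMap (fun x => [10 * x + 0, 10 * x + 5])

/-- Canonical form of A's accumulated list. -/
def pvC (l r : Int) : List Int :=
  (PySem.List.pyRange l (r + 1) 1).filter (fun i => decide (0 ≤ i) && pvGoodN i.toNat)

/-- Canonical form of B's accumulated list. -/
def pvB (l r : Int) : List Int :=
  (if l ≤ 0 ∧ 0 ≤ r then [0] else []) ++
    (List.range 10).flatMap (fun j => (pvGen j).filter (fun x => decide (l ≤ x ∧ x ≤ r)))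

lemma pvGoodN_lt {n : Nat} (h : n < 10) : pvGoodN n = (n == 0 || n == 5) := by
  unfold pvGoodN; rw [dif_pos h]

lemma pvGoodN_ge {n : Nat} (h : 10 ≤ n) :
    pvGoodN n = ((n % 10 == 0 || n % 10 == 5) && pvGoodN (n / 10)) := by
  conv_lhs => rw [pvGoodN]
  rw [dif_neg (by omega)]

lemma pvCheck_append (a b : List Char) : pvCheck (a ++ b) = (pvCheck a && pvCheck b) := by
  induction a with
  | nil => simp [pvCheck]
  | cons c cs ih => by_cases h : ¬(c = '5' ∨ c = '0') <;> simp [pvCheck, h, ih]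

lemma pvDigitCheck : ∀ d, d < 10 → pvCheck [Nat.digitChar d] = (d == 0 || d == 5) := by decide

lemma pvDigitVal : ∀ d, d < 10 → ((Nat.digitChar d).toNat : Int) - 48 = (d : Int) := by decide

lemma pvCheck_toDigits (n : Nat) : pvCheck (Nat.toDigits 10 n) = pvGoodN n := by
  induction n using Nat.strong_induction_on with
  | _ n ih =>
    by_cases h : n < 10
    · rw [Nat.toDigits_of_lt_base h, pvGoodN_lt h, pvDigitCheck n h]
    · rw [Nat.toDigits_of_base_le (by norm_num) (by omega), pvCheck_append,
        pvGoodN_ge (by omega), ih (n / 10) (by omega), pvDigitCheck (n % 10) (by omega),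
        Bool.and_comm]

lemma pvInt_append_digit (a : List Char) (c : Char) :
    pvInt (a ++ [c]) = 10 * pvInt a + ((c.toNat : Int) - 48) := by
  simp [pvInt, List.foldl_append]

lemma pvInt_toDigits (n : Nat) : pvInt (Nat.toDigits 10 n) = (n : Int) := by
  induction n using Nat.strong_induction_on with
  | _ n ih =>
    by_cases h : n < 10
    · rw [Nat.toDigits_of_lt_base h]
      have := pvDigitVal n h
      simp [pvInt]
      omega
    · rw [Nat.toDigits_of_base_le (by norm_num) (by omega), pvInt_append_digit,
        ih (n / 10) (by omega), pvDigitVal (n % 10) (by omega)]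
      omega

lemma pvGoodN_dvd {n : Nat} (h : pvGoodN n = true) : 5 ∣ n := by
  induction n using Nat.strong_induction_on with
  | _ n ih =>
    by_cases hn : n < 10
    · rw [pvGoodN_lt hn] at h
      simp only [Bool.or_eq_true, beq_iff_eq] at h
      omega
    · rw [pvGoodN_ge (by omega)] at h
      simp only [Bool.and_eq_true, Bool.or_eq_true, beq_iff_eq] at h
      have h5 := ih (n / 10) (by omega) h.2
      omega

lemma pvQ_eq (i : Int) :
    (decide (PySem.Int.mod i 5 = 0) && pvCheck (PySem.Int.toChars i))
      = (decide (0 ≤ i) && pvGoodN i.toNat) := by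
  rcases lt_or_ge i 0 with hi | hi
  · have ht : PySem.Int.toChars i = '-' :: Nat.toDigits 10 i.natAbs := by
      simp [PySem.Int.toChars, if_pos hi]
    rw [ht]
    simp [pvCheck, not_le.2 hi]
  · obtain ⟨n, rfl⟩ := Int.eq_ofNat_of_zero_le hi
    have htc : PySem.Int.toChars (n : Int) = Nat.toDigits 10 n := by
      simp [PySem.Int.toChars]
    rw [htc, pvCheck_toDigits]
    by_cases hg : pvGoodN n = true
    · have h5 : (5 : Nat) ∣ n := pvGoodN_dvd hg
      simp [hg, hi]
      exact_mod_cast h5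
    · simp [Bool.eq_false_iff.1 (by simpa using hg)]

lemma pvAlist_eq (l r : Int) : solution l r = (if pvC l r = [] then [-1] else pvC l r) := by
  simp only [solution]
  have hbody : (fun (answer : List Int) (i : Int) =>
      if PySem.Int.mod i 5 ≠ 0 then answer
      else if pvCheck (PySem.Int.toChars i) then answer ++ [pvInt (PySem.Int.toChars i)]
      else answer)
      = fun (answer : List Int) (i : Int) =>
        if (decide (0 ≤ i) && pvGoodN i.toNat) = true then answer ++ [pvInt (PySem.Int.toChars i)]
        else answer := by
    funext a i
    rw [← pvQ_eq i]
    by_cases h1 : (5 : Int) ∣ i <;> simp [h1]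
  rw [hbody, PySem.List.foldl_append_if]
  have hmap : ∀ i ∈ (PySem.List.pyRange l (r + 1) 1).filter
      (fun i => decide (0 ≤ i) && pvGoodN i.toNat), pvInt (PySem.Int.toChars i) = i := by
    intro i hi
    have h0 : 0 ≤ i := by
      have := (List.mem_filter.1 hi).2
      simp only [Bool.and_eq_true, decide_eq_true_eq] at this
      exact this.1
    obtain ⟨n, rfl⟩ := Int.eq_ofNat_of_zero_le h0
    have htc : PySem.Int.toChars (n : Int) = Nat.toDigits 10 n := by
      simp [PySem.Int.toChars]
    rw [htc, pvInt_toDigits]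
  rw [List.map_congr_left hmap]
  simp only [List.map_id_fun', id_eq, List.nil_append]
  rfl

lemma pvFoldB (l r : Int) (init : List Int) (k : Nat) :
    (List.range k).foldl (fun (p : List Int × List Int) _ =>
      (p.1 ++ p.2.filter (fun x => decide (l ≤ x ∧ x ≤ r)),
       p.2.flatMap (fun x => [10 * x + 0, 10 * x + 5]))) (init, [5])
    = (init ++ (List.range k).flatMap (fun j => (pvGen j).filter (fun x => decide (l ≤ x ∧ x ≤ r))),
       pvGen k) := by
  induction k with
  | zero => simp [pvGen]
  | succ k ih =>
      rw [List.range_succ, List.foldl_append, ih]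
      simp [pvGen, List.flatMap_append]

lemma pvBlist_eq (l r : Int) : solution_alt l r = (if pvB l r = [] then [-1] else pvB l r) := by
  simp only [solution_alt]
  rw [pvFoldB]
  rfl

lemma pvGen_mem (k : Nat) (x : Int) :
    x ∈ pvGen k ↔ 0 ≤ x ∧ pvGoodN x.toNat = true ∧ 5 * 10 ^ k ≤ x ∧ x < 10 ^ (k + 1) := by
  induction k generalizing x with
  | zero =>
      simp only [pvGen, List.mem_singleton, pow_zero, mul_one]
      constructor
      · rintro rfl
        refine ⟨by norm_num, ?_, by norm_num, by norm_num⟩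
        rw [show Int.toNat 5 = 5 from rfl, pvGoodN_lt (by norm_num)]
        decide
      · rintro ⟨h0, hg, h1, h2⟩
        have hn : x.toNat < 10 := by omega
        rw [pvGoodN_lt hn] at hg
        simp only [Bool.or_eq_true, beq_iff_eq] at hg
        omega
  | succ k ih =>
      have hP : (0 : Int) < 10 ^ k := pow_pos (by norm_num) k
      have hps : (10 : Int) ^ (k + 1) = 10 ^ k * 10 := pow_succ 10 k
      have hps2 : (10 : Int) ^ (k + 2) = 10 ^ k * 10 * 10 := by rw [pow_succ, hps]
      simp only [pvGen, List.mem_flatMap, List.mem_cons]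
      constructor
      · rintro ⟨y, hy, hx⟩
        obtain ⟨h0, hg, h1, h2⟩ := (ih y).1 hy
        have hd : x = 10 * y + 0 ∨ x = 10 * y + 5 := by
          rcases hx with h | h | h
          · exact Or.inl h
          · exact Or.inr h
          · cases h
        have hx0 : 0 ≤ x := by omega
        have hn10 : 10 ≤ x.toNat := by omega
        have hdiv : x.toNat / 10 = y.toNat := by omega
        have hmod : x.toNat % 10 = 0 ∨ x.toNat % 10 = 5 := by omega
        refine ⟨hx0, ?_, by omega, by omega⟩
        rw [pvGoodN_ge hn10, hdiv]
        simp only [Bool.and_eq_true, Bool.or_eq_true, beq_iff_eq]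
        exact ⟨by omega, hg⟩
      · rintro ⟨h0, hg, h1, h2⟩
        have hn10 : 10 ≤ x.toNat := by omega
        rw [pvGoodN_ge hn10] at hg
        simp only [Bool.and_eq_true, Bool.or_eq_true, beq_iff_eq] at hg
        refine ⟨((x.toNat / 10 : Nat) : Int), (ih _).2 ⟨by omega, ?_, by omega, by omega⟩, by omega⟩
        simp only [Int.toNat_natCast]
        exact hg.2

lemma pvGen_pairwise (k : Nat) : (pvGen k).Pairwise (· < ·) := by
  induction k with
  | zero => simp [pvGen]
  | succ k ih =>
      rw [pvGen]
      refine List.pairwise_flatMap.2 ⟨fun a _ => ?_, ih.imp ?_⟩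
      · refine List.Pairwise.cons ?_ (List.pairwise_singleton _ _)
        intro b hb
        rcases List.mem_cons.1 hb with rfl | hb
        · omega
        · simp at hb
      · intro a b hab u hu v hv
        simp only [List.mem_cons, List.not_mem_nil, or_false] at hu hv
        rcases hu with h | h <;> rcases hv with h' | h' <;> omega

lemma pvLead (j : Nat) : ∀ n : Nat, pvGoodN n = true → 10 ^ j ≤ n → n < 10 ^ (j + 1) →
    5 * 10 ^ j ≤ n := by
  induction j with
  | zero =>
      intro n hg h1 h2
      simp only [pow_zero] at *
      rw [pvGoodN_lt (by omega)] at hg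
      simp only [Bool.or_eq_true, beq_iff_eq] at hg
      omega
  | succ j ih =>
      intro n hg h1 h2
      have hQ : 0 < 10 ^ j := pow_pos (by norm_num) j
      have hps : (10 : Nat) ^ (j + 1) = 10 ^ j * 10 := pow_succ 10 j
      have hps2 : (10 : Nat) ^ (j + 2) = 10 ^ j * 10 * 10 := by rw [pow_succ, hps]
      have hn10 : 10 ≤ n := by omega
      rw [pvGoodN_ge hn10] at hg
      simp only [Bool.and_eq_true, Bool.or_eq_true, beq_iff_eq] at hg
      have := ih (n / 10) hg.2 (by omega) (by omega)
      omega

lemma pvC_pairwise (l r : Int) : (pvC l r).Pairwise (· < ·) := by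
  exact (PySem.List.pairwise_lt_pyRange_one l (r + 1)).filter _

lemma pvB_pairwise (l r : Int) : (pvB l r).Pairwise (· < ·) := by
  unfold pvB
  refine List.pairwise_append.2 ⟨?_, ?_, ?_⟩
  · split_ifs <;> simp
  · refine List.pairwise_flatMap.2 ⟨fun j _ => (pvGen_pairwise j).filter _, ?_⟩
    refine List.pairwise_lt_range.imp ?_
    intro j1 j2 hj x hx y hy
    have hx' := ((pvGen_mem j1 x).1 (List.mem_filter.1 hx).1).2.2.2
    have hy' := ((pvGen_mem j2 y).1 (List.mem_filter.1 hy).1).2.2.1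
    have hpow : (10 : Int) ^ (j1 + 1) ≤ 10 ^ j2 := pow_le_pow_right₀ (by norm_num) (by omega)
    have h5 : (10 : Int) ^ j2 ≤ 5 * 10 ^ j2 := by
      have := pow_pos (show (0:Int) < 10 by norm_num) j2
      omega
    omega
  · intro a ha b hb
    have ha0 : a = 0 := by
      revert ha; split_ifs <;> simp
    obtain ⟨j, -, hb⟩ := List.mem_flatMap.1 hb
    have hbm := ((pvGen_mem j b).1 (List.mem_filter.1 hb).1).2.2.1
    have := pow_pos (show (0:Int) < 10 by norm_num) j
    omega

lemma pvMem_iff (l r : Int) (hd : Dom_solution l r) (x : Int) : x ∈ pvC l r ↔ x ∈ pvB l r := by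
  have hr : r ≤ 2147483648 := by
    simp only [Dom_solution, pvDomInt, Bool.and_eq_true, decide_eq_true_eq] at hd
    exact hd.2.2
  unfold pvC pvB
  simp only [List.mem_filter, List.mem_append, List.mem_flatMap, List.mem_range,
    PySem.List.mem_pyRange_one, Bool.and_eq_true, decide_eq_true_eq]
  constructor
  · rintro ⟨⟨hl, hr'⟩, h0, hg⟩
    by_cases hx0 : x = 0
    · subst hx0
      left
      rw [if_pos (show l ≤ 0 ∧ 0 ≤ r from ⟨hl, by omega⟩)]
      exact List.mem_singleton.2 rfl
    · right
      -- bracket x between consecutive powers of 10 via Nat.log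
      have hn1 : 1 ≤ x.toNat := by omega
      set n := x.toNat with hn
      set j := Nat.log 10 n with hj
      have hlow : 10 ^ j ≤ n := Nat.pow_log_le_self 10 (by omega)
      have hhigh : n < 10 ^ (j + 1) := Nat.lt_pow_succ_log_self (by norm_num) n
      have hlead : 5 * 10 ^ j ≤ n := pvLead j n hg hlow hhigh
      have hj10 : j < 10 := by
        by_contra hge
        have : (10 : Nat) ^ 10 ≤ 10 ^ j := Nat.pow_le_pow_right (by norm_num) (by omega)
        have : (10 : Nat) ^ 10 ≤ n := le_trans this hlow
        norm_num at this
        omega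
      refine ⟨j, hj10, (pvGen_mem j x).2 ⟨h0, hg, ?_, ?_⟩, hl, by omega⟩
      · have : ((5 * 10 ^ j : Nat) : Int) ≤ (n : Int) := by exact_mod_cast hlead
        push_cast at this
        omega
      · have : ((n : Nat) : Int) < ((10 ^ (j + 1) : Nat) : Int) := by exact_mod_cast hhigh
        push_cast at this
        omega
  · rintro (h | ⟨j, -, h⟩)
    · have hx0 : x = 0 ∧ l ≤ 0 ∧ 0 ≤ r := by
        by_cases h' : l ≤ 0 ∧ 0 ≤ r
        · rw [if_pos h'] at h
          exact ⟨List.mem_singleton.1 h, h'⟩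
        · rw [if_neg h'] at h
          simp at h
      obtain ⟨rfl, hl, hr'⟩ := hx0
      refine ⟨⟨hl, by omega⟩, le_refl 0, ?_⟩
      rw [show Int.toNat 0 = 0 from rfl, pvGoodN_lt (by norm_num)]
      decide
    · obtain ⟨hmem, hl, hr'⟩ := h
      obtain ⟨h0, hg, -, -⟩ := (pvGen_mem j x).1 hmem
      exact ⟨⟨hl, by omega⟩, h0, hg⟩

lemma pvC_eq_pvB (l r : Int) (hd : Dom_solution l r) : pvC l r = pvB l r := by
  have hc := pvC_pairwise l r
  have hb := pvB_pairwise l r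
  have hperm : (pvC l r).Perm (pvB l r) :=
    (List.perm_ext_iff_of_nodup (hc.imp ne_of_lt) (hb.imp ne_of_lt)).2 (pvMem_iff l r hd)
  exact hperm.eq_of_pairwise (fun a b _ _ h1 h2 => absurd h2 (lt_asymm h1)) hc hb

-- ===== VERDICT (by name: the statement is the Claim_ definition above) =====
theorem solution_spec : Claim_equal_solution := by
  intro l r hd
  unfold Spec_solution
  rw [pvAlist_eq, pvBlist_eq, pvC_eq_pvB l r hd]
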